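-- pv_equiv track=rewrite | github.com/AliVaziri1999/Introduction_to_Data_Structures_and_Algorithms_16-198-512-03 | Session03/hw03/q5.py | delete_last_n
-- ===== SOURCE A (Python) =====
-- def delete_last_n(data, value, n):
--     write = len(data) - 1  # pointer starts at the end
--     removed = 0  # count how many we removed
--
--     for read in range(len(data) - 1, -1, -1):  # start from right to left
--         if data[read] == value and removed < n:
--             removed += 1
--         else:
--             data[write] = data[read]
--             write -= 1
--
--     for i in range(write + 1):  # remove extra front
--         data.pop(0)
--
--     return data
-- ===== SOURCE B (Python) =====
-- def delete_last_n(data, value, n):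
--     # Count-then-forward-keep: keep the first `keep` occurrences of value.
--     total = data.count(value)
--     keep = total - min(max(n, 0), total)
--     result = []
--     kept = 0
--     for x in data:
--         if x != value:
--             result.append(x)
--         elif kept < keep:
--             result.append(x)
--             kept += 1
--     data[:] = result
--     return data
-- ===== Notes on version B (the rewrite author's own statement) =====
-- stated objective: alternative
-- what changed: Replaces A's backward two-pointer in-place compaction (right-to-left scan writing survivors toward the tail, then popping the leftover front) with a count-then-forward pass: count occurrences once, compute how many matches to keep, then build the result left-to-right keeping only the first `keep` matches.
import Mathlib
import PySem

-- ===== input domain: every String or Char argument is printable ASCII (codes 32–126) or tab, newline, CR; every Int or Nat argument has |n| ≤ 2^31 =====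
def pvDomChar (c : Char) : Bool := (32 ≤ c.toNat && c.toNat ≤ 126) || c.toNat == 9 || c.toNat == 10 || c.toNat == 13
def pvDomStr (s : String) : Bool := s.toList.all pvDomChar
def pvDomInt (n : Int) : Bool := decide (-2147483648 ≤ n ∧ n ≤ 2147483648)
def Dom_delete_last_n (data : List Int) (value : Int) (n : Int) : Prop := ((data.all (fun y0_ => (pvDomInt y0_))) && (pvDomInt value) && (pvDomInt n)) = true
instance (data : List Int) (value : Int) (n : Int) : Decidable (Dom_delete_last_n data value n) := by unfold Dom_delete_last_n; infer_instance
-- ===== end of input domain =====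

-- B replaces A's backward two-pointer compaction + repeated pop(0) (quadratic) by one
-- counting pass and one forward keep-first-k pass (linear). A mutates `data` in place and
-- B mirrors that with data[:] = result; the equivalence proved here is about the return value.

-- B replaces A's backward two-pointer compaction plus repeated pop(0) with one counting
-- pass and one forward keep-first-k pass (a different decomposition of the same task).
-- A mutates `data` in place and B mirrors that with data[:] = result; the equivalence
-- proved here is about the return value.

-- ===== PORT A =====
-- one step of A's right-to-left loop; state = (data, write, removed)
def stepA (value n : Int) (s : List Int × Int × Int) (read : Int) : List Int × Int × Int :=
  let x := PySem.List.pyGetD s.1 read 0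
  if x = value ∧ s.2.2 < n then
    (s.1, s.2.1, s.2.2 + 1)
  else
    (PySem.List.pySetD s.1 s.2.1 x, s.2.1 - 1, s.2.2)

-- data[read] is always in range, so the total form pyGetD is exact; likewise write is
-- always a valid nonnegative index when data[write] = data[read] runs (pySetD).
def delete_last_n (data : List Int) (value : Int) (n : Int) : List Int :=
  let s := (PySem.List.pyRange ((data.length : Int) - 1) (-1) (-1)).foldl (stepA value n)
             (data, ((data.length : Int) - 1, 0))
  -- for i in range(write + 1): data.pop(0)  (the list is never empty when popped, so `none` is unreachable)
  (PySem.List.pyRange 0 (s.2.1 + 1) 1).foldl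
    (fun d _ => match PySem.List.pop? d 0 with | some p => p.2 | none => d) s.1

-- ===== PORT B =====
-- one step of B's forward loop; state = (result, kept)
def stepB (value keep : Int) (s : List Int × Int) (x : Int) : List Int × Int :=
  if x ≠ value then (s.1 ++ [x], s.2)
  else if s.2 < keep then (s.1 ++ [x], s.2 + 1)
  else s

def delete_last_n_alt (data : List Int) (value : Int) (n : Int) : List Int :=
  let total : Int := (PySem.List.count data value : Int)
  let keep := total - min (max n 0) total
  (data.foldl (stepB value keep) ([], 0)).1


-- ===== PRECONDITION & SPEC =====
def Spec_delete_last_n (data : List Int) (value : Int) (n : Int) (out : List Int) : Prop := out = delete_last_n_alt data value n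
instance (data : List Int) (value : Int) (n : Int) (out : List Int) : Decidable (Spec_delete_last_n data value n out) := by unfold Spec_delete_last_n; infer_instance

-- ===== CLAIM (what is proved, stated in full; the proofs are below) =====
def Claim_equal_delete_last_n : Prop := ∀ (data : List Int) (value : Int) (n : Int), Dom_delete_last_n data value n → Spec_delete_last_n data value n (delete_last_n data value n)

-- ===== LEMMAS AND PROOFS =====

-- A's right-to-left loop, abstractly: foldr with removed-counter starting at r
def rfold (value n : Int) (l : List Int) (r : Int) : List Int × Int :=
  l.foldr (fun x s => if x = value ∧ s.2 < n then (s.1, s.2 + 1) else (x :: s.1, s.2)) ([], r)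

-- B's loop as a budgeted recursion: keep the first b occurrences of value
def fkeep (value : Int) (b : Int) : List Int → List Int
  | [] => []
  | x :: t => if x = value then (if 0 < b then x :: fkeep value (b - 1) t else fkeep value b t)
              else x :: fkeep value b t

lemma rfold_nil (value n r : Int) : rfold value n [] r = ([], r) := rfl

lemma rfold_acc (value n : Int) (l : List Int) (a : List Int) (r : Int) :
    l.foldr (fun x s => if x = value ∧ s.2 < n then (s.1, s.2 + 1) else (x :: s.1, s.2)) (a, r)
      = ((rfold value n l r).1 ++ a, (rfold value n l r).2) := by
  induction l with
  | nil => simp [rfold]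
  | cons x t ih =>
    simp only [List.foldr_cons, ih, rfold]
    split_ifs with h <;> simp_all

lemma rfold_append_singleton (value n : Int) (l : List Int) (x r : Int) :
    rfold value n (l ++ [x]) r
      = if x = value ∧ r < n then rfold value n l (r + 1)
        else ((rfold value n l r).1 ++ [x], (rfold value n l r).2) := by
  simp only [rfold, List.foldr_append, List.foldr_cons, List.foldr_nil]
  split_ifs with h
  · rfl
  · exact rfold_acc value n l [x] r

lemma rfold_length_le (value n : Int) (l : List Int) (r : Int) :
    (rfold value n l r).1.length ≤ l.length := by
  induction l with
  | nil => simp [rfold]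
  | cons x t ih =>
    simp only [rfold, List.foldr_cons] at *
    split_ifs <;> simp <;> omega

-- bridge: rfold with r = 0 is the forward keep-first-b filter
lemma rfold_eq_fkeep (value n : Int) (l : List Int) :
    rfold value n l 0
      = (fkeep value ((l.count value : Int) - min (max n 0) (l.count value)) l,
         min (max n 0) ((l.count value : Int))) := by
  induction l with
  | nil => simp [rfold, fkeep]
  | cons x t ih =>
    have hc : (0:Int) ≤ (t.count value : Int) := Int.natCast_nonneg _
    simp only [rfold, List.foldr_cons] at *
    rw [ih]
    by_cases hx : x = value
    · subst hx
      simp only [List.count_cons_self]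
      push_cast
      by_cases hlt : min (max n 0) ((t.count x : Int)) < n
      · have hn : 0 < n := by omega
        have hcn : (t.count x : Int) < n := by omega
        have h1 : min (max n 0) ((t.count x : Int)) = (t.count x : Int) := by omega
        have h2 : min (max n 0) ((t.count x : Int) + 1) = (t.count x : Int) + 1 := by omega
        simp only [h1, h2]
        rw [if_pos ⟨trivial, hcn⟩]
        simp only [Prod.mk.injEq]
        refine ⟨?_, by trivial⟩
        rw [show (t.count x : Int) + 1 - ((t.count x : Int) + 1) = 0 by ring]
        rw [show (t.count x : Int) - (t.count x : Int) = 0 by ring]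
        simp [fkeep]
      · have h1 : min (max n 0) ((t.count x : Int)) = max n 0 := by omega
        have h2 : min (max n 0) ((t.count x : Int) + 1) = max n 0 := by omega
        simp only [h1, h2]
        rw [if_neg (by simp only [true_and]; omega)]
        simp only [Prod.mk.injEq]
        refine ⟨?_, by trivial⟩
        rw [show (t.count x : Int) + 1 - max n 0 = ((t.count x : Int) - max n 0) + 1 by ring]
        simp only [fkeep, if_pos (show (0:Int) < (t.count x : Int) - max n 0 + 1 by omega)]
        rw [show (t.count x : Int) - max n 0 + 1 - 1 = (t.count x : Int) - max n 0 by ring]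
        simp
    · simp only [List.count_cons_of_ne (by simpa using hx)]
      rw [if_neg (fun h => hx h.1)]
      simp only [Prod.mk.injEq]
      refine ⟨?_, by trivial⟩
      simp [fkeep, hx]

-- B's foldl equals the budgeted filter
lemma bfold_eq_fkeep (value keep : Int) (l : List Int) (a : List Int) (k : Int) :
    (l.foldl (stepB value keep) (a, k)).1 = a ++ fkeep value (keep - k) l := by
  induction l generalizing a k with
  | nil => simp [fkeep]
  | cons x t ih =>
    simp only [List.foldl_cons, stepB]
    by_cases hx : x = value
    · subst hx
      simp only [ne_eq, not_true_eq_false, if_false, fkeep]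
      by_cases hk : k < keep
      · rw [if_pos hk, if_pos (by omega : (0:Int) < keep - k), ih]
        rw [show keep - (k+1) = keep - k - 1 by ring]
        simp
      · rw [if_neg hk, if_neg (by omega : ¬ (0:Int) < keep - k), ih]
        simp
    · rw [if_pos (by simpa using hx), ih]
      simp [fkeep, hx]

lemma alt_eq_fkeep (data : List Int) (value n : Int) :
    delete_last_n_alt data value n
      = fkeep value ((data.count value : Int) - min (max n 0) (data.count value)) data := by
  simp only [delete_last_n_alt, PySem.List.count_eq]
  rw [bfold_eq_fkeep]
  simp

-- pop(0) loop = drop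
lemma popfold_eq_drop (idx : List Int) (l : List Int) :
    (idx.foldl (fun d _ => match PySem.List.pop? d 0 with | some p => p.2 | none => d) l)
      = l.drop idx.length := by
  induction idx generalizing l with
  | nil => simp
  | cons i t ih =>
    cases l with
    | nil =>
      simp only [List.foldl_cons]
      rw [show (match PySem.List.pop? ([] : List Int) 0 with
                | some p => p.2 | none => ([] : List Int)) = [] from rfl]
      rw [ih]
      simp
    | cons x xs =>
      simp only [List.foldl_cons, PySem.List.pop?_zero_cons, ih, List.length_cons, List.drop_succ_cons]

-- MAIN invariant for A's backward loop
lemma mainA (value n : Int) :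
    ∀ (m : Nat) (d : List Int) (w r : Int), m ≤ d.length → (m : Int) - 1 ≤ w → w < (d.length : Int) →
    (PySem.List.pyRange ((m : Int) - 1) (-1) (-1)).foldl (stepA value n) (d, w, r)
      = (d.take ((w + 1 - ((rfold value n (d.take m) r).1.length : Int)).toNat)
          ++ (rfold value n (d.take m) r).1 ++ d.drop ((w + 1).toNat),
         w - ((rfold value n (d.take m) r).1.length : Int),
         (rfold value n (d.take m) r).2) := by
  intro m
  induction m with
  | zero =>
    intro d w r _ hw1 hw2
    rw [PySem.List.pyRange_neg_one_eq_nil (by norm_num)]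
    simp only [List.foldl_nil, List.take_zero, rfold_nil]
    simp [List.take_append_drop]
  | succ m ih =>
    intro d w r hm hw1 hw2
    have hmw : (m : Int) ≤ w := by push_cast at hw1; omega
    have hw0 : (0:Int) ≤ w := by omega
    have hmd : m < d.length := by omega
    -- peel off the first processed index, m
    rw [show (((m + 1 : Nat) : Int)) - 1 = (m : Int) by push_cast; ring,
        PySem.List.pyRange_neg_one_cons (by omega : (-1:Int) < (m:Int))]
    simp only [List.foldl_cons]
    have hx : stepA value n (d, w, r) (m : Int)
        = (let x := d.getD m 0;
           if x = value ∧ r < n then (d, w, r + 1)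
           else (d.set w.toNat x, w - 1, r)) := by
      simp only [stepA, PySem.List.pyGetD_natCast]
      split_ifs with h
      · rfl
      · rw [PySem.List.pySetD_of_nonneg _ _ hw0]
    set x := d.getD m 0 with hxdef
    have htake : d.take (m + 1) = d.take m ++ [x] := by
      rw [List.take_add_one]
      simp [List.getElem?_eq_getElem hmd, hxdef]
    rw [hx]
    by_cases hcond : x = value ∧ r < n
    · rw [if_pos hcond]
      rw [ih d w (r + 1) (by omega) (by omega) hw2]
      rw [htake, rfold_append_singleton, if_pos hcond]
    · simp only [if_neg hcond]
      rw [ih (d.set w.toNat x) (w - 1) r (by simp only [List.length_set]; omega)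
            (by omega) (by simp only [List.length_set]; omega)]
      rw [show (d.set w.toNat x).take m = d.take m from
            List.take_set_of_le (by omega : m ≤ w.toNat)]
      rw [htake, rfold_append_singleton, if_neg hcond]
      have hL : ((rfold value n (d.take m) r).1.length : Int) ≤ (m : Int) := by
        have := rfold_length_le value n (d.take m) r
        simp only [List.length_take] at this
        omega
      set out := (rfold value n (d.take m) r).1 with hout
      set L := (out.length : Int) with hLdef
      simp only [Prod.mk.injEq]
      refine ⟨?_, ⟨by simp only [List.length_append, List.length_cons, List.length_nil]; push_cast; omega, trivial⟩⟩
      -- lists: take of set, drop of set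
      have h1 : (d.set w.toNat x).take ((w - 1 + 1 - L).toNat) = d.take ((w - L).toNat) := by
        rw [show (w - 1 + 1 - L) = w - L by ring]
        exact List.take_set_of_le (by omega : (w - L).toNat ≤ w.toNat)
      have h2 : (d.set w.toNat x).drop ((w - 1 + 1).toNat) = x :: d.drop ((w + 1).toNat) := by
        rw [show (w - 1 + 1) = w by ring]
        rw [List.drop_set]
        rw [if_neg (by omega)]
        simp only [Nat.sub_self]
        have hlen : w.toNat < d.length := by omega
        have hne : (d.drop w.toNat) ≠ [] := by
          simp [List.drop_eq_nil_iff]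
          omega
        obtain ⟨y, ys, hys⟩ := List.exists_cons_of_ne_nil hne
        rw [hys]
        have : ys = d.drop (w.toNat + 1) := by
          have := congrArg List.tail hys
          simpa [List.tail_drop] using this.symm
        rw [this, show (w + 1).toNat = w.toNat + 1 by omega]
        rfl
      rw [h1, h2]
      have harith : (w + 1 - ((out ++ [x]).length : Int)).toNat = (w - L).toNat := by
        simp only [List.length_append, List.length_cons, List.length_nil]
        push_cast
        congr 1
        ring
      rw [harith]
      simp


lemma A_eq_rfold (data : List Int) (value n : Int) :
    delete_last_n data value n = (rfold value n data 0).1 := by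
  rcases data with _ | ⟨y, ys⟩
  · rfl
  · set d := y :: ys with hd
    have hlen : 0 < d.length := by simp [hd]
    have hL := rfold_length_le value n d 0
    have hmain := mainA value n d.length d ((d.length : Int) - 1) 0 le_rfl
      (by omega) (by omega)
    rw [List.take_length] at hmain
    simp only [delete_last_n]
    rw [hmain]
    rw [popfold_eq_drop]
    rw [PySem.List.length_pyRange_one]
    have h1 : ((d.length : Int) - 1 + 1).toNat = d.length := by omega
    rw [h1, List.drop_length, List.append_nil]
    have h2 : ((d.length : Int) - 1 - ((rfold value n d 0).1.length : Int) + 1 - 0).toNat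
        = ((d.length : Int) - 1 + 1 - ((rfold value n d 0).1.length : Int)).toNat := by omega
    rw [h2]
    set K := (((d.length : Int) - 1 + 1 - ((rfold value n d 0).1.length : Int)).toNat) with hK
    have h3 : (d.take K).length = K := by rw [List.length_take]; omega
    have := List.drop_left (l₁ := d.take K) (l₂ := (rfold value n d 0).1)
    rw [h3] at this
    exact this

lemma alt_eq_A_fkeep (data : List Int) (value n : Int) :
    delete_last_n data value n = delete_last_n_alt data value n := by
  rw [A_eq_rfold, rfold_eq_fkeep, alt_eq_fkeep]

-- ===== VERDICT (by name: the statement is the Claim_ definition above) =====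
theorem delete_last_n_spec : Claim_equal_delete_last_n := by
  intro data value n _
  show delete_last_n data value n = delete_last_n_alt data value n
  exact alt_eq_A_fkeep data value n
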